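-- pv_equiv track=rewrite | github.com/Rhn12/BaekJoon | 백준/Gold/1377. 버블 소트/버블 소트.py | min_bubble_sort_passes
-- ===== SOURCE A (Python) =====
-- def min_bubble_sort_passes(arr):
--     n = len(arr)
--     indexed_arr = [(val, idx) for idx, val in enumerate(arr)]
--
--     indexed_arr.sort()
--
--     max_displacement = 0
--     for new_index, (value, original_index) in enumerate(indexed_arr):
--         displacement = original_index - new_index
--         if displacement > max_displacement:
--             max_displacement = displacement
--
--     return max_displacement + 1
-- ===== SOURCE B (Python) =====
-- def min_bubble_sort_passes(arr):
--     vals = sorted(arr)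
--     first = {}
--     for k, v in enumerate(vals):
--         if v not in first:
--             first[v] = k
--     seen = {}
--     best = 0
--     for i, v in enumerate(arr):
--         r = first[v] + seen.get(v, 0)
--         seen[v] = seen.get(v, 0) + 1
--         if i - r > best:
--             best = i - r
--     return best + 1
-- ===== Notes on version B (the rewrite author's own statement) =====
-- stated objective: alternative
-- what changed: B never sorts (value, index) tuples nor reads original indices out of a sorted list: it sorts the bare values once, hashes each value's first sorted position (= count of strictly smaller elements), and scans the original order with a duplicate counter to get each element's rank and the running max displacement.
import Mathlib
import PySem

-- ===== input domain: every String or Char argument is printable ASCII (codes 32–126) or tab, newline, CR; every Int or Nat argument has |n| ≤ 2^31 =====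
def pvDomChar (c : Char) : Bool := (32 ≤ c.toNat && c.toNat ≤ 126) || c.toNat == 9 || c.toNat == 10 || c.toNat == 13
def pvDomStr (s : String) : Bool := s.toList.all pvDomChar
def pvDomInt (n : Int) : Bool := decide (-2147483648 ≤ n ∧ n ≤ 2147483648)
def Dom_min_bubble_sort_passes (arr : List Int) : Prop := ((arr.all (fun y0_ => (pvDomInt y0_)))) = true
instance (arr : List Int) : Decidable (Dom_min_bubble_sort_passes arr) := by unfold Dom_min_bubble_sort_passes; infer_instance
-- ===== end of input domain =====

-- B avoids A's (value, index) tuple sort: it sorts the bare values, hashes each value's first sorted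
-- position (= number of strictly smaller elements) and scans the original order with a duplicate
-- counter to get each element's rank — an alternative decomposition of the same O(n log n) cost.

-- ===== PORT A =====
def min_bubble_sort_passes (arr : List Int) : Int :=
  let indexed_arr := (PySem.List.enumerate arr).map (fun p => (p.2, p.1))
  let sorted_arr := PySem.List.sorted2 indexed_arr Prod.fst Prod.snd
  let max_displacement := (PySem.List.enumerate sorted_arr).foldl
    (fun acc p => if p.2.2 - p.1 > acc then p.2.2 - p.1 else acc) 0
  max_displacement + 1

-- ===== PORT B =====
def min_bubble_sort_passes_alt (arr : List Int) : Int :=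
  let vals := PySem.List.sorted arr (fun x => x)
  let first := (PySem.List.enumerate vals).foldl
    (fun d p => if d.contains p.2 then d else d.insert p.2 p.1)
    (PySem.Dict.empty : PySem.Dict Int Int)
  let res := (PySem.List.enumerate arr).foldl
    (fun st p =>
      -- first[p.2]: ported with getD; the key is always present, vals being a permutation of arr
      let r := first.getD p.2 0 + st.1.getD p.2 0
      (st.1.insert p.2 (st.1.getD p.2 0 + 1),
       if p.1 - r > st.2 then p.1 - r else st.2))
    ((PySem.Dict.empty : PySem.Dict Int Int), (0 : Int))
  res.2 + 1

-- ===== PRECONDITION & SPEC =====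
def Spec_min_bubble_sort_passes (arr : List Int) (out : Int) : Prop := out = min_bubble_sort_passes_alt arr
instance (arr : List Int) (out : Int) : Decidable (Spec_min_bubble_sort_passes arr out) := by unfold Spec_min_bubble_sort_passes; infer_instance

-- ===== CLAIM (what is proved, stated in full; the proofs are below) =====
def Claim_equal_min_bubble_sort_passes : Prop := ∀ (arr : List Int), Dom_min_bubble_sort_passes arr → Spec_min_bubble_sort_passes arr (min_bubble_sort_passes arr)

-- ===== LEMMAS AND PROOFS =====

-- the strict lexicographic order A's tuple sort uses, as a Bool
def pvLtB (a b : Int × Int) : Bool := decide (a.1 < b.1) || (decide (a.1 = b.1) && decide (a.2 < b.2))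
-- the comparison sorted2 actually inserts by
def pvBA : (Int × Int) → (Int × Int) → Bool :=
  fun a b => decide (a.1 < b.1) || (!decide (b.1 < a.1) && decide (a.2 < b.2))
-- the stable rank of (value v, position i): elements lexicographically before it
def pvCnt (arr : List Int) (x : Int × Int) : Int :=
  ((PySem.List.enumerate arr).countP (fun q => pvLtB (q.2, q.1) x) : Int)

theorem pvBA_eq_pvLtB : pvBA = pvLtB := by
  funext a b
  by_cases h1 : a.1 < b.1 <;> by_cases h2 : a.1 = b.1 <;>
    simp [pvBA, pvLtB, h1, h2] <;> omega

theorem pvLtB_asymm {a b : Int × Int} (h : pvLtB a b = true) : pvLtB b a = false := by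
  simp [pvLtB] at *; omega

theorem pvLtB_irrefl (a : Int × Int) : pvLtB a a = false := by simp [pvLtB]

theorem pvLtB_total {a b : Int × Int} (h2 : a.2 ≠ b.2) (h : pvLtB a b = false) :
    pvLtB b a = true := by
  simp [pvLtB] at *; omega

theorem pv_sorted2_unfold (xs : List (Int × Int)) :
    PySem.List.sorted2 xs Prod.fst Prod.snd =
      List.foldl (fun acc x => PySem.List.insertBy pvBA x acc) [] xs := rfl

theorem pv_insertBy_cons {α : Type} (b : α → α → Bool) (x y : α) (ys : List α) :
    PySem.List.insertBy b x (y :: ys) =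
      if b x y then x :: y :: ys else y :: PySem.List.insertBy b x ys := by
  simp [PySem.List.insertBy]

-- inserting preserves the weak sortedness invariant
theorem pv_insert_sorted (x : Int × Int) (ys : List (Int × Int))
    (h : ys.Pairwise (fun a b => pvLtB b a = false)) :
    (PySem.List.insertBy pvLtB x ys).Pairwise (fun a b => pvLtB b a = false) := by
  induction ys with
  | nil => simp [PySem.List.insertBy]
  | cons y ys ih =>
    rw [pv_insertBy_cons]
    rcases List.pairwise_cons.mp h with ⟨hy, hys⟩
    by_cases hc : pvLtB x y = true
    · rw [if_pos hc]
      refine List.pairwise_cons.mpr ⟨?_, h⟩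
      intro z hz
      rcases List.mem_cons.mp hz with rfl | hz'
      · exact pvLtB_asymm hc
      · have hyz := hy z hz'
        have hxz := pvLtB_asymm hc
        simp [pvLtB] at *; omega
    · rw [if_neg hc]
      refine List.pairwise_cons.mpr ⟨?_, ih hys⟩
      intro z hz
      rcases (PySem.List.mem_insertBy _ _ _ _).mp hz with rfl | hz'
      · simpa using hc
      · exact hy z hz'

theorem pv_foldl_insert_sorted (xs acc : List (Int × Int))
    (h : acc.Pairwise (fun a b => pvLtB b a = false)) :
    (List.foldl (fun acc x => PySem.List.insertBy pvLtB x acc) acc xs).Pairwise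
      (fun a b => pvLtB b a = false) := by
  induction xs generalizing acc with
  | nil => exact h
  | cons x xs ih => exact ih _ (pv_insert_sorted x acc h)

-- in a strictly sorted list, the index of an element is the number of elements below it
theorem pv_count_pos (s : List (Int × Int)) (h : s.Pairwise (fun a b => pvLtB a b = true))
    (k : Nat) (hk : k < s.length) :
    s.countP (fun y => pvLtB y s[k]) = k := by
  induction s generalizing k with
  | nil => simp at hk
  | cons x t ih =>
    rcases List.pairwise_cons.mp h with ⟨hx, ht⟩
    rcases k with _ | k
    · simp only [List.getElem_cons_zero, List.countP_cons]
      rw [pvLtB_irrefl, List.countP_eq_zero.mpr]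
      · simp
      · intro y hy
        simp [pvLtB_asymm (hx y hy)]
    · simp only [List.getElem_cons_succ, List.countP_cons]
      have hklt : k < t.length := by simpa using hk
      rw [ih ht k hklt, hx t[k] (List.getElem_mem hklt)]
      simp

-- the stable rank splits into "strictly smaller anywhere" + "equal and earlier"
theorem pv_cnt_split (l : List Int) (s v i : Int) :
    (PySem.List.enumerate l s).countP (fun q => pvLtB (q.2, q.1) (v, i))
      = l.countP (fun w => decide (w < v)) + (l.take (i - s).toNat).count v := by
  induction l generalizing s with
  | nil => simp [PySem.List.enumerate_nil]
  | cons w t ih =>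
    rw [PySem.List.enumerate_cons, List.countP_cons, List.countP_cons, ih (s + 1)]
    have htake : ((w :: t).take (i - s).toNat).count v
        = (t.take (i - (s + 1)).toNat).count v + (if w = v ∧ s < i then 1 else 0) := by
      by_cases hsi : s < i
      · have h1 : (i - s).toNat = (i - (s + 1)).toNat + 1 := by omega
        rw [h1, List.take_succ_cons, List.count_cons]
        by_cases hv : w = v <;> simp [hv, hsi]
      · have h1 : (i - s).toNat = 0 := by omega
        have h2 : (i - (s + 1)).toNat = 0 := by omega
        simp [h1, h2, hsi]
    rw [htake]
    by_cases hw : w < v <;> by_cases hv : w = v <;> by_cases hsi : s < i <;>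
      simp [pvLtB, hw, hv, hsi] <;> omega

-- the first-occurrence dict never overwrites an existing key
theorem pv_first_frozen (l : List Int) (s : Int) (d : PySem.Dict Int Int) (v : Int)
    (hd : d.contains v = true) :
    ((PySem.List.enumerate l s).foldl
        (fun d p => if d.contains p.2 then d else d.insert p.2 p.1) d).get? v = d.get? v := by
  induction l generalizing s d with
  | nil => simp [PySem.List.enumerate_nil]
  | cons w t ih =>
    rw [PySem.List.enumerate_cons, List.foldl_cons]
    dsimp only
    by_cases hc : d.contains w = true
    · rw [if_pos hc]
      exact ih (s + 1) d hd
    · rw [if_neg (by simp [hc])]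
      have hvw : v ≠ w := fun h => hc (h ▸ hd)
      rw [ih (s + 1) _ (by rw [PySem.Dict.contains_insert]; simp [hd])]
      exact PySem.Dict.get?_insert_of_ne d _ hvw

-- … and on a sorted list it records, for each value, the count of strictly smaller elements
theorem pv_first_getD (l : List Int) (s : Int) (d : PySem.Dict Int Int) (v : Int)
    (hsorted : l.Pairwise (· ≤ ·)) (hv : v ∈ l) (hd : d.contains v = false) :
    ((PySem.List.enumerate l s).foldl
        (fun d p => if d.contains p.2 then d else d.insert p.2 p.1) d).getD v 0
      = s + (l.countP (fun w => decide (w < v)) : Int) := by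
  induction l generalizing s d with
  | nil => simp at hv
  | cons w t ih =>
    rw [PySem.List.enumerate_cons, List.foldl_cons]
    dsimp only
    rcases List.pairwise_cons.mp hsorted with ⟨hw, ht⟩
    by_cases hwv : w = v
    · subst hwv
      rw [if_neg (by simp [hd])]
      have hcnt : (w :: t).countP (fun x => decide (x < w)) = 0 := by
        rw [List.countP_eq_zero]
        intro a ha
        rcases List.mem_cons.mp ha with rfl | hat
        · simp
        · have := hw a hat
          simp; omega
      have hfrozen := pv_first_frozen t (s + 1) (d.insert w s) w
        (by rw [PySem.Dict.contains_insert]; simp)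
      have hg : ((PySem.List.enumerate t (s + 1)).foldl
          (fun d p => if d.contains p.2 then d else d.insert p.2 p.1)
          (d.insert w s)).get? w = some s := by
        rw [hfrozen, PySem.Dict.get?_insert_self]
      rw [hcnt]
      simp [PySem.Dict.getD, hg]
    · have hvt : v ∈ t := by
        rcases List.mem_cons.mp hv with h | h
        · exact absurd h.symm hwv
        · exact h
      have hwlt : w < v := lt_of_le_of_ne (hw v hvt) hwv
      have hcnt : (w :: t).countP (fun x => decide (x < v))
          = t.countP (fun x => decide (x < v)) + 1 := by
        simp [List.countP_cons, hwlt]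
      by_cases hc : d.contains w = true
      · rw [if_pos hc, ih (s + 1) d ht hvt hd, hcnt]
        push_cast; ring
      · rw [if_neg (by simp [hc])]
        rw [ih (s + 1) _ ht hvt
          (by rw [PySem.Dict.contains_insert]; simp [hd, hwv, Ne.symm hwv])]
        rw [hcnt]
        push_cast; ring

-- B's counter scan computes the running max of (position - stable rank)
theorem pv_loopB (arr : List Int) (f : Int → Int)
    (hf : ∀ v ∈ arr, f v = (arr.countP (fun w => decide (w < v)) : Int)) :
    ∀ (l pref : List Int) (seen : PySem.Dict Int Int) (best : Int),
    pref ++ l = arr →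
    (∀ v : Int, seen.getD v 0 = (pref.count v : Int)) →
    ((PySem.List.enumerate l (pref.length : Int)).foldl
      (fun st p =>
        (st.1.insert p.2 (st.1.getD p.2 0 + 1),
         if p.1 - (f p.2 + st.1.getD p.2 0) > st.2
           then p.1 - (f p.2 + st.1.getD p.2 0) else st.2))
      (seen, best)).2
    = (PySem.List.enumerate l (pref.length : Int)).foldl
        (fun b q => max b (q.1 - pvCnt arr (q.2, q.1))) best := by
  intro l
  induction l with
  | nil =>
    intro pref seen best _ _
    simp [PySem.List.enumerate_nil]
  | cons v t ih =>
    intro pref seen best harr hseen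
    rw [PySem.List.enumerate_cons, List.foldl_cons, List.foldl_cons]
    dsimp only
    have hv : v ∈ arr := by rw [← harr]; simp
    have hr : f v + seen.getD v 0 = pvCnt arr (v, (pref.length : Int)) := by
      rw [hf v hv, hseen v]
      unfold pvCnt
      rw [pv_cnt_split arr 0 v (pref.length : Int)]
      have h1 : ((pref.length : Int) - 0).toNat = pref.length := by omega
      rw [h1, ← harr, List.take_left]
      push_cast; ring
    have hif : (if (pref.length : Int) - (f v + seen.getD v 0) > best
          then (pref.length : Int) - (f v + seen.getD v 0) else best)
        = max best ((pref.length : Int) - pvCnt arr (v, (pref.length : Int))) := by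
      rw [hr]; omega
    rw [hif]
    have hseen' : ∀ v' : Int,
        (seen.insert v (seen.getD v 0 + 1)).getD v' 0 = ((pref ++ [v]).count v' : Int) := by
      intro v'
      by_cases h : v' = v
      · subst h
        rw [PySem.Dict.getD_insert_self, hseen]
        have h1 : (pref ++ [v']).count v' = pref.count v' + 1 := by simp
        rw [h1]
        push_cast; ring
      · rw [PySem.Dict.getD_insert_of_ne _ _ _ h, hseen]
        have h0 : List.count v' [v] = 0 := List.count_eq_zero.mpr (by simp [h])
        rw [List.count_append, h0]
        simp
    have := ih (pref ++ [v]) (seen.insert v (seen.getD v 0 + 1))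
      (max best ((pref.length : Int) - pvCnt arr (v, (pref.length : Int))))
      (by rw [← harr]; simp) hseen'
    simpa using this

-- ===== VERDICT (by name: the statement is the Claim_ definition above) =====
theorem min_bubble_sort_passes_spec : Claim_equal_min_bubble_sort_passes := by
  intro arr _
  unfold Spec_min_bubble_sort_passes min_bubble_sort_passes min_bubble_sort_passes_alt
  simp only []
  set paired := (PySem.List.enumerate arr).map (fun p => (p.2, p.1)) with hpaired
  set s := PySem.List.sorted2 paired Prod.fst Prod.snd with hs
  have hperm : s.Perm paired := PySem.List.sorted2_perm paired Prod.fst Prod.snd false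
  -- s is weakly sorted and its second components are distinct, hence strictly sorted
  have hsort : s.Pairwise (fun a b => pvLtB b a = false) := by
    rw [hs, pv_sorted2_unfold, pvBA_eq_pvLtB]
    exact pv_foldl_insert_sorted _ _ (by simp)
  have hsnd : (s.map Prod.snd).Nodup := by
    refine (hperm.map Prod.snd).nodup_iff.mpr ?_
    have : paired.map Prod.snd = (PySem.List.enumerate arr).map Prod.fst := by
      rw [hpaired, List.map_map]; rfl
    rw [this, PySem.List.map_fst_enumerate]
    exact PySem.List.nodup_pyRange_one _ _
  have hne : s.Pairwise (fun a b => a.2 ≠ b.2) := List.pairwise_map.mp hsnd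
  have hstrict : s.Pairwise (fun a b => pvLtB a b = true) := by
    have := hsort.and hne
    exact this.imp (fun h => pvLtB_total (Ne.symm h.2) h.1)
  -- the stable rank, over the original pairing
  set cnt := fun x => (paired.countP (fun y => pvLtB y x) : Int) with hcnt
  have hbridge : ∀ x, cnt x = pvCnt arr x := by
    intro x
    simp only [hcnt, hpaired, pvCnt, List.countP_map]
    rfl
  -- A's loop is foldl max 0 over s.map (fun x => x.2 - cnt x)
  have hstepA : (fun (acc : Int) (p : Int × (Int × Int)) =>
      if p.2.2 - p.1 > acc then p.2.2 - p.1 else acc) = fun acc p => max acc (p.2.2 - p.1) := by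
    funext acc p; dsimp only; omega
  have hLA : (PySem.List.enumerate s).map (fun p => p.2.2 - p.1)
      = s.map (fun x => x.2 - cnt x) := by
    apply List.ext_getElem
    · simp [PySem.List.length_enumerate]
    · intro k h1 h2
      have hk : k < s.length := by simpa [PySem.List.length_enumerate] using h1
      simp only [List.getElem_map]
      rw [PySem.List.getElem_enumerate s 0 k (by simpa [PySem.List.length_enumerate] using h1)]
      have : cnt s[k] = (k : Int) := by
        simp only [hcnt]
        rw [← hperm.countP_eq, pv_count_pos s hstrict k hk]
      rw [this]
      simp
  rw [hstepA]
  have hfoldA : (PySem.List.enumerate s).foldl (fun acc p => max acc (p.2.2 - p.1)) 0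
      = List.foldl max 0 (s.map (fun x => x.2 - cnt x)) := by
    rw [← hLA, List.foldl_map]
  rw [hfoldA]
  -- B's first dict holds, for every value of arr, the count of strictly smaller elements
  set vals := PySem.List.sorted arr (fun x => x) with hvals
  set first := (PySem.List.enumerate vals).foldl
    (fun d p => if d.contains p.2 then d else d.insert p.2 p.1)
    (PySem.Dict.empty : PySem.Dict Int Int) with hfirst
  have hf : ∀ v ∈ arr, first.getD v 0 = (arr.countP (fun w => decide (w < v)) : Int) := by
    intro v hv
    have hvv : v ∈ vals := by
      rw [hvals, PySem.List.mem_sorted]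
      exact hv
    have hsorted : vals.Pairwise (· ≤ ·) := by
      have := PySem.List.sorted_pairwise arr (fun x => x)
      rw [← hvals] at this
      simpa using this
    have hempty : (PySem.Dict.empty : PySem.Dict Int Int).contains v = false := rfl
    rw [hfirst, pv_first_getD vals 0 PySem.Dict.empty v hsorted hvv hempty]
    have hp : vals.Perm arr := by rw [hvals]; exact PySem.List.sorted_perm arr (fun x => x) false
    rw [hp.countP_eq]
    ring
  -- B's loop via the counter invariant
  have hseen0 : ∀ v : Int, (PySem.Dict.empty : PySem.Dict Int Int).getD v 0
      = (([] : List Int).count v : Int) := by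
    intro v; rfl
  have hloop := pv_loopB arr (fun v => first.getD v 0) hf arr [] PySem.Dict.empty 0 rfl hseen0
  simp only [List.length_nil, Nat.cast_zero] at hloop
  rw [hloop]
  -- both are foldl max over the same multiset of displacements
  have hfoldB : (PySem.List.enumerate arr).foldl
        (fun b q => max b (q.1 - pvCnt arr (q.2, q.1))) 0
      = List.foldl max 0 (paired.map (fun x => x.2 - cnt x)) := by
    have h1 : (PySem.List.enumerate arr).foldl
          (fun b q => max b (q.1 - pvCnt arr (q.2, q.1))) 0
        = (PySem.List.enumerate arr).foldl
          (fun b q => max b (q.1 - cnt (q.2, q.1))) 0 := by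
      simp only [hbridge]
    rw [h1, hpaired, List.map_map, List.foldl_map]
    rfl
  rw [hfoldB]
  have hpermL : (s.map (fun x => x.2 - cnt x)).Perm (paired.map (fun x => x.2 - cnt x)) :=
    hperm.map _
  rw [hpermL.foldl_eq 0]
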